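-- pv_equiv track=rewrite | github.com/jaw039/CODEPATH | session4.1.py | navigate_research_station
-- ===== SOURCE A (Python) =====
-- def navigate_research_station(station_layout, observations):
--     starting_index = 0
--     total = 0
--
--     for char1 in observations:
--         for index, char2 in enumerate(station_layout):
--             if char1 == char2:
--                 total += abs(starting_index - index)
--                 starting_index = index
--
--
--     return total
-- ===== SOURCE B (Python) =====
-- def navigate_research_station(station_layout, observations):
--     span = {}
--     for i, c in enumerate(station_layout):
--         if c in span:
--             span[c] = (span[c][0], i)
--         else:
--             span[c] = (i, i)
--     start = 0
--     total = 0
--     for c in observations: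
--         fl = span.get(c)
--         if fl is not None:
--             f, l = fl
--             total += abs(start - f) + (l - f)
--             start = l
--     return total
-- ===== Notes on version B (the rewrite author's own statement) =====
-- stated objective: faster
-- what changed: B precomputes each character's first and last occurrence index in the layout in one pass (a dict), so each observation char is handled in O(1) as abs(start-first)+(last-first) instead of rescanning the whole layout.
import Mathlib
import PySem

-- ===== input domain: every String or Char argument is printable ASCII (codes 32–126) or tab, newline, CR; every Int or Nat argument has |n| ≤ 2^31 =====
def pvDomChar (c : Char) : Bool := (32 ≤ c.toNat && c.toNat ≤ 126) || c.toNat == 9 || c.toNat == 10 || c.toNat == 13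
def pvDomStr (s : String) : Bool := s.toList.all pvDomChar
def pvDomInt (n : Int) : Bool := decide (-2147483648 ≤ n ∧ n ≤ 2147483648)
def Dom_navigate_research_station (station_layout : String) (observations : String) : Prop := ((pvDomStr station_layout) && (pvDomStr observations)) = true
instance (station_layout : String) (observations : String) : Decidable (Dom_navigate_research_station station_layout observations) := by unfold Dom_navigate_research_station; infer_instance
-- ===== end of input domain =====

-- B replaces A's rescan of the whole layout for every observation char by a one-pass
-- precomputed first/last-occurrence dictionary (objective: faster, asymptotic).

-- ===== PORT A =====
-- literal port: for char1 in observations: for index, char2 in enumerate(station_layout): …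
def navigate_research_station (station_layout : String) (observations : String) : Int :=
  (observations.toList.foldl
    (fun (st : Int × Int) char1 =>
      (PySem.List.enumerate station_layout.toList 0).foldl
        (fun (st : Int × Int) p =>
          if char1 = p.2 then (p.1, st.2 + |st.1 - p.1|) else st) st)
    (0, 0)).2

-- ===== PORT B =====
-- literal port of Source B: build span : Char → (first, last) in one pass, then fold observations
def navigate_research_station_alt (station_layout : String) (observations : String) : Int :=
  let span : PySem.Dict Char (Int × Int) :=
    (PySem.List.enumerate station_layout.toList 0).foldl
      (fun d p =>
        match d.get? p.2 with
        | some fl => d.insert p.2 (fl.1, p.1)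
        | none    => d.insert p.2 (p.1, p.1))
      PySem.Dict.empty
  (observations.toList.foldl
    (fun (st : Int × Int) c =>
      match span.get? c with
      | some fl => (fl.2, st.2 + |st.1 - fl.1| + (fl.2 - fl.1))
      | none    => st)
    (0, 0)).2

-- ===== PRECONDITION & SPEC =====
def Spec_navigate_research_station (station_layout : String) (observations : String) (out : Int) : Prop := out = navigate_research_station_alt station_layout observations
instance (station_layout : String) (observations : String) (out : Int) : Decidable (Spec_navigate_research_station station_layout observations out) := by unfold Spec_navigate_research_station; infer_instance

-- ===== CLAIM (what is proved, stated in full; the proofs are below) =====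
def Claim_equal_navigate_research_station : Prop := ∀ (station_layout : String) (observations : String), Dom_navigate_research_station station_layout observations → Spec_navigate_research_station station_layout observations (navigate_research_station station_layout observations)

-- ===== LEMMAS AND PROOFS =====

-- proof-side helpers: structural descriptions of the two loops

-- the step of B's dictionary-building loop
def pvDStep (d : PySem.Dict Char (Int × Int)) (p : Int × Char) : PySem.Dict Char (Int × Int) :=
  match d.get? p.2 with
  | some fl => d.insert p.2 (fl.1, p.1)
  | none    => d.insert p.2 (p.1, p.1)

-- how one enumerated entry updates the (first, last) record of a fixed char c
def pvFlStep (c : Char) (acc : Option (Int × Int)) (p : Int × Char) : Option (Int × Int) :=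
  if p.2 = c then (match acc with | none => some (p.1, p.1) | some q => some (q.1, p.1)) else acc

-- last index ≥ k in xs (enumerated from k) holding c, defaulting to l
def pvLast (c : Char) : List Char → Int → Int → Int
  | [], _, l => l
  | x :: xs, k, l => if x = c then pvLast c xs (k + 1) k else pvLast c xs (k + 1) l

-- structural (first, last) of c in xs enumerated from k
def pvFL (c : Char) : List Char → Int → Option (Int × Int)
  | [], _ => none
  | x :: xs, k => if x = c then some (k, pvLast c xs (k + 1) k) else pvFL c xs (k + 1)

theorem pvDict_get (c : Char) : ∀ (e : List (Int × Char)) (d : PySem.Dict Char (Int × Int)),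
    (e.foldl pvDStep d).get? c = e.foldl (pvFlStep c) (d.get? c) := by
  intro e
  induction e with
  | nil => intro d; rfl
  | cons p e ih =>
    intro d
    simp only [List.foldl_cons, ih]
    congr 1
    unfold pvDStep pvFlStep
    by_cases hc : p.2 = c
    · subst hc
      cases h : d.get? p.2 with
      | none => simp [PySem.Dict.get?_insert_self]
      | some q => simp [PySem.Dict.get?_insert_self]
    · have hne : c ≠ p.2 := fun h' => hc h'.symm
      cases h : d.get? p.2 with
      | none => rw [PySem.Dict.get?_insert_of_ne _ _ hne]; simp [hc]
      | some q => rw [PySem.Dict.get?_insert_of_ne _ _ hne]; simp [hc]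

theorem pvFlAux_some (c : Char) : ∀ (xs : List Char) (k f l : Int),
    (PySem.List.enumerate xs k).foldl (pvFlStep c) (some (f, l)) = some (f, pvLast c xs k l) := by
  intro xs
  induction xs with
  | nil => intro k f l; rfl
  | cons x xs ih =>
    intro k f l
    rw [PySem.List.enumerate_cons]
    simp only [List.foldl_cons, pvFlStep, pvLast]
    by_cases hx : x = c <;> simp [hx, ih]

theorem pvFlAux_none (c : Char) : ∀ (xs : List Char) (k : Int),
    (PySem.List.enumerate xs k).foldl (pvFlStep c) none = pvFL c xs k := by
  intro xs
  induction xs with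
  | nil => intro k; rfl
  | cons x xs ih =>
    intro k
    rw [PySem.List.enumerate_cons]
    simp only [List.foldl_cons, pvFlStep, pvFL]
    by_cases hx : x = c <;> simp [hx, ih, pvFlAux_some]

-- A's inner loop after the first match: start = l, every later match at i ≥ l adds i - l
theorem pvInner_phase2 (c : Char) : ∀ (xs : List Char) (k l t : Int), l ≤ k →
    (PySem.List.enumerate xs k).foldl
      (fun (st : Int × Int) p => if c = p.2 then (p.1, st.2 + |st.1 - p.1|) else st) (l, t)
    = (pvLast c xs k l, t + (pvLast c xs k l - l)) := by
  intro xs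
  induction xs with
  | nil => intro k l t _; simp [PySem.List.enumerate, pvLast]
  | cons x xs ih =>
    intro k l t hlk
    rw [PySem.List.enumerate_cons]
    simp only [List.foldl_cons, pvLast]
    by_cases hx : x = c
    · subst hx
      have habs : |l - k| = k - l := by rw [abs_sub_comm]; exact abs_of_nonneg (by omega)
      simp only [if_true, habs]
      rw [ih (k + 1) k (t + (k - l)) (by omega), Prod.mk.injEq]
      exact ⟨rfl, by ring⟩
    · have hcx : ¬ (c = x) := fun h => hx h.symm
      simp only [if_neg hcx, if_neg hx]
      exact ih (k + 1) l t (by omega)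

-- A's inner loop equals the (first,last) summary
theorem pvInner_eq (c : Char) : ∀ (xs : List Char) (k s t : Int),
    (PySem.List.enumerate xs k).foldl
      (fun (st : Int × Int) p => if c = p.2 then (p.1, st.2 + |st.1 - p.1|) else st) (s, t)
    = (match pvFL c xs k with
       | none => (s, t)
       | some q => (q.2, t + |s - q.1| + (q.2 - q.1))) := by
  intro xs
  induction xs with
  | nil => intro k s t; simp [PySem.List.enumerate, pvFL]
  | cons x xs ih =>
    intro k s t
    rw [PySem.List.enumerate_cons]
    simp only [List.foldl_cons, pvFL]
    by_cases hx : x = c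
    · subst hx
      simp only [if_true]
      rw [pvInner_phase2 x xs (k + 1) k (t + |s - k|) (by omega)]
    · have : ¬ (c = x) := fun h => hx h.symm
      simp only [if_neg this, if_neg hx]
      exact ih (k + 1) s t

-- ===== VERDICT (by name: the statement is the Claim_ definition above) =====
theorem navigate_research_station_spec : Claim_equal_navigate_research_station := by
  intro sl obs _
  unfold Spec_navigate_research_station navigate_research_station navigate_research_station_alt
  simp only []
  congr 1
  have hstep : ∀ (st : Int × Int) (c : Char),
      (PySem.List.enumerate sl.toList 0).foldl
        (fun (st : Int × Int) p => if c = p.2 then (p.1, st.2 + |st.1 - p.1|) else st) st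
      = (match ((PySem.List.enumerate sl.toList 0).foldl pvDStep PySem.Dict.empty).get? c with
         | some fl => (fl.2, st.2 + |st.1 - fl.1| + (fl.2 - fl.1))
         | none => st) := by
    intro st c
    rw [pvDict_get c _ PySem.Dict.empty]
    have hempty : (PySem.Dict.empty : PySem.Dict Char (Int × Int)).get? c = none := rfl
    rw [hempty, pvFlAux_none]
    obtain ⟨s, t⟩ := st
    rw [pvInner_eq c sl.toList 0 s t]
    cases pvFL c sl.toList 0 <;> rfl
  have : ∀ (l : List Char) (st : Int × Int),
      l.foldl (fun (st : Int × Int) c =>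
        (PySem.List.enumerate sl.toList 0).foldl
          (fun (st : Int × Int) p => if c = p.2 then (p.1, st.2 + |st.1 - p.1|) else st) st) st
      = l.foldl (fun (st : Int × Int) c =>
          match ((PySem.List.enumerate sl.toList 0).foldl pvDStep PySem.Dict.empty).get? c with
          | some fl => (fl.2, st.2 + |st.1 - fl.1| + (fl.2 - fl.1))
          | none => st) st := by
    intro l
    induction l with
    | nil => intro st; rfl
    | cons c l ih => intro st; rw [List.foldl_cons, List.foldl_cons, hstep]; exact ih _
  exact this obs.toList (0, 0)
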